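-- pv_equiv track=rewrite | github.com/Nyanyan/Egaroucid | src/tools/extract_pattern/generate_evaluation_definition.py | rotate_feature
-- ===== SOURCE A (Python) =====
-- def xy_to_coord(x, y):
--     return 'COORD_' + chr(ord('A') + x) + str(y + 1)
--
-- def rotate_feature(ss, n):
--
--     res = [[] for _ in range(8)]
--
--     for elem in ss:
--         x = ord(elem[-2]) - ord('A')
--         y = int(elem[-1]) - 1
--
--         res[0].append(xy_to_coord(x, y))
--         res[1].append(xy_to_coord(7 - y, 7 - x)) # black
--         res[2].append(xy_to_coord(y, x)) # white
--         res[3].append(xy_to_coord(7 - x, 7 - y)) # 180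
--         res[4].append(xy_to_coord(7 - x, y)) # v mirror
--         res[5].append(xy_to_coord(x, 7 - y)) # h mirror
--         res[6].append(xy_to_coord(7 - y, x)) # v black
--         res[7].append(xy_to_coord(y, 7 - x)) # v white
--
--     res_str = ''
--     for arr in res:
--         arr_s = '{' + str(len(arr)) + ', {' + ', '.join(arr) + '}}, // ' + str(n)
--         res_str += arr_s + '\n'
--         n += 1
--     return res_str
-- ===== SOURCE B (Python) =====
-- def xy_to_coord(x, y):
--     return 'COORD_' + chr(ord('A') + x) + str(y + 1)
--
-- def rotate_feature(ss, n):
--     # Derive the 8 symmetry rows compositionally from the dihedral-group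
--     # generators (diagonal swap, h-mirror, v-mirror) applied to previously
--     # computed rows, instead of applying 8 explicit formulas per element.
--     base = [(ord(e[-2]) - ord('A'), int(e[-1]) - 1) for e in ss]
--     swap = lambda r: [(y, x) for (x, y) in r]
--     hmir = lambda r: [(x, 7 - y) for (x, y) in r]
--     vmir = lambda r: [(7 - x, y) for (x, y) in r]
--     t2 = swap(base)
--     t4 = vmir(base)
--     t5 = hmir(base)
--     t6 = vmir(t2)
--     t7 = hmir(t2)
--     t1 = vmir(t7)
--     t3 = vmir(t5)
--     rows = [base, t1, t2, t3, t4, t5, t6, t7]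
--     return ''.join(
--         '{' + str(len(r)) + ', {' + ', '.join(xy_to_coord(x, y) for (x, y) in r)
--         + '}}, // ' + str(n + i) + '\n'
--         for i, r in enumerate(rows))
-- ===== Notes on version B (the rewrite author's own statement) =====
-- stated objective: alternative
-- what changed: B parses coordinates once, then derives the 8 symmetry rows compositionally from three dihedral-group generators (swap, h-mirror, v-mirror) applied to previously computed rows (t1=v(h(s)), t3=v(h), t6=v(s), t7=h(s)), and renders the output with an enumerate-join instead of A's per-element loop applying 8 explicit formulas into indexed lists with a mutable counter.
import Mathlib
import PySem

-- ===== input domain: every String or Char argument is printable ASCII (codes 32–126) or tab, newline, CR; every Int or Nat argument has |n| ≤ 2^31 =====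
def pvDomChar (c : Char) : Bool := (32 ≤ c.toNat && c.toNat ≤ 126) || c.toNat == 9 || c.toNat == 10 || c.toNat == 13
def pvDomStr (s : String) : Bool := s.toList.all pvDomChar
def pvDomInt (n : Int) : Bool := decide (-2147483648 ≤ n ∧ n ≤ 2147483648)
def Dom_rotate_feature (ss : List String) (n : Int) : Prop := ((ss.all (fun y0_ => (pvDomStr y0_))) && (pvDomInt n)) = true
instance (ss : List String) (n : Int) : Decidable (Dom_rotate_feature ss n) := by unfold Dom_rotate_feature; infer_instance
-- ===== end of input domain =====

-- B derives the 8 symmetry rows compositionally from the three dihedral-group generators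
-- (swap, h-mirror, v-mirror) applied to previously computed rows, and renders with an
-- enumerate-join, instead of A's per-element loop applying 8 explicit formulas.

-- shared helpers (identical module-level code in both Pythons)
def xyToCoord (x y : Int) : String :=
  "COORD_" ++ String.ofList [Char.ofNat (65 + x).toNat] ++ PySem.Int.toStr (y + 1)

-- x = ord(elem[-2]) - ord('A'); y = int(elem[-1]) - 1  (defaults unreachable inside Pre_)
def parseX (elem : String) : Int :=
  (((PySem.Str.pyGet? elem (-2)).getD 'A').toNat : Int) - 65
def parseY (elem : String) : Int :=
  (PySem.Int.ofChars? [(PySem.Str.pyGet? elem (-1)).getD '0']).getD 0 - 1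

-- ===== PORT A =====
-- the final formatting loop of A, with the mutable counter n
def fmtRows (rows : List (List String)) (n : Int) : String :=
  (rows.foldl (fun (acc : String × Int) arr =>
      (acc.1 ++ "{" ++ PySem.Int.toStr (arr.length : Int) ++ ", {" ++ PySem.Str.join ", " arr
        ++ "}}, // " ++ PySem.Int.toStr acc.2 ++ "\n", acc.2 + 1)) ("", n)).1

def rotAStep (r : List String × List String × List String × List String ×
      List String × List String × List String × List String) (elem : String) :
    List String × List String × List String × List String ×
      List String × List String × List String × List String :=
  let x := parseX elem
  let y := parseY elem
  (r.1 ++ [xyToCoord x y],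
   r.2.1 ++ [xyToCoord (7 - y) (7 - x)],
   r.2.2.1 ++ [xyToCoord y x],
   r.2.2.2.1 ++ [xyToCoord (7 - x) (7 - y)],
   r.2.2.2.2.1 ++ [xyToCoord (7 - x) y],
   r.2.2.2.2.2.1 ++ [xyToCoord x (7 - y)],
   r.2.2.2.2.2.2.1 ++ [xyToCoord (7 - y) x],
   r.2.2.2.2.2.2.2 ++ [xyToCoord y (7 - x)])

def rotate_feature (ss : List String) (n : Int) : String :=
  let res := ss.foldl rotAStep ([], [], [], [], [], [], [], [])
  fmtRows [res.1, res.2.1, res.2.2.1, res.2.2.2.1, res.2.2.2.2.1,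
           res.2.2.2.2.2.1, res.2.2.2.2.2.2.1, res.2.2.2.2.2.2.2] n

-- ===== PORT B =====
def rowSwap (r : List (Int × Int)) : List (Int × Int) := r.map (fun p => (p.2, p.1))
def rowHmir (r : List (Int × Int)) : List (Int × Int) := r.map (fun p => (p.1, 7 - p.2))
def rowVmir (r : List (Int × Int)) : List (Int × Int) := r.map (fun p => (7 - p.1, p.2))

def rotate_feature_alt (ss : List String) (n : Int) : String :=
  let base := ss.map (fun e => (parseX e, parseY e))
  let t2 := rowSwap base
  let t4 := rowVmir base
  let t5 := rowHmir base
  let t6 := rowVmir t2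
  let t7 := rowHmir t2
  let t1 := rowVmir t7
  let t3 := rowVmir t5
  let rows := [base, t1, t2, t3, t4, t5, t6, t7]
  PySem.Str.join "" ((PySem.List.enumerate rows).map (fun ir =>
    "{" ++ PySem.Int.toStr (ir.2.length : Int) ++ ", {"
      ++ PySem.Str.join ", " (ir.2.map (fun p => xyToCoord p.1 p.2))
      ++ "}}, // " ++ PySem.Int.toStr (n + ir.1) ++ "\n"))

-- ===== PRECONDITION & SPEC =====
-- Pre_ excludes exactly the inputs where A raises: an element shorter than 2 characters
-- (IndexError on elem[-2]) or whose last character is not a decimal digit (ValueError in int).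
def Pre_rotate_feature (ss : List String) (n : Int) : Prop :=
  ss.all (fun s => decide (2 ≤ s.toList.length) && (s.toList.getLastD ' ').isDigit) = true
instance (ss : List String) (n : Int) : Decidable (Pre_rotate_feature ss n) := by
  unfold Pre_rotate_feature; infer_instance

def pvWitness_rotate_feature : List String × Int := (["COORD_A1", "COORD_H8"], 0)

def Spec_rotate_feature (ss : List String) (n : Int) (out : String) : Prop := out = rotate_feature_alt ss n
instance (ss : List String) (n : Int) (out : String) : Decidable (Spec_rotate_feature ss n out) := by unfold Spec_rotate_feature; infer_instance

-- ===== CLAIM (what is proved, stated in full; the proofs are below) =====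
def Claim_equal_rotate_feature : Prop := ∀ (ss : List String) (n : Int), Dom_rotate_feature ss n → Pre_rotate_feature ss n → Spec_rotate_feature ss n (rotate_feature ss n)

-- ===== LEMMAS AND PROOFS =====

lemma rotA_foldl_maps (ss : List String)
    (a0 a1 a2 a3 a4 a5 a6 a7 : List String) :
    ss.foldl rotAStep (a0, a1, a2, a3, a4, a5, a6, a7) =
      (a0 ++ ss.map (fun e => xyToCoord (parseX e) (parseY e)),
       a1 ++ ss.map (fun e => xyToCoord (7 - parseY e) (7 - parseX e)),
       a2 ++ ss.map (fun e => xyToCoord (parseY e) (parseX e)),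
       a3 ++ ss.map (fun e => xyToCoord (7 - parseX e) (7 - parseY e)),
       a4 ++ ss.map (fun e => xyToCoord (7 - parseX e) (parseY e)),
       a5 ++ ss.map (fun e => xyToCoord (parseX e) (7 - parseY e)),
       a6 ++ ss.map (fun e => xyToCoord (7 - parseY e) (parseX e)),
       a7 ++ ss.map (fun e => xyToCoord (parseY e) (7 - parseX e))) := by
  induction ss generalizing a0 a1 a2 a3 a4 a5 a6 a7 with
  | nil => simp
  | cons e tl ih =>
    simp only [List.foldl_cons, List.map_cons, rotAStep, ih]
    simp

-- ===== VERDICT (by name: the statement is the Claim_ definition above) =====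
theorem rotate_feature_spec : Claim_equal_rotate_feature := by
  intro ss n _ _
  unfold Spec_rotate_feature rotate_feature rotate_feature_alt
  simp only [rotA_foldl_maps, List.nil_append, rowSwap, rowHmir, rowVmir, List.map_map,
    PySem.List.enumerate_cons, PySem.List.enumerate_nil, List.map_cons, List.map_nil,
    PySem.Str.join, fmtRows, List.foldl_cons, List.foldl_nil, List.length_map]
  ring_nf
  apply String.toList_injective
  simp [PySem.Chars.join_cons_cons, PySem.Chars.join_singleton, Function.comp_def]
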